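-- pv_equiv track=rewrite | github.com/vjsingh1984/victor | victor/tools/shared_ast_utils.py | get_line_count
-- ===== SOURCE A (Python) =====
-- from typing import Dict, Iterator, List, Optional, Tuple, Union
--
-- def get_line_count(code: str) -> Dict[str, int]:
--     """Count different types of lines in code.
--
--     Args:
--         code: Python source code.
--
--     Returns:
--         Dictionary with 'total', 'code', 'blank', 'comment' counts.
--     """
--     lines = code.split("\n")
--     total = len(lines)
--     blank = len([line for line in lines if not line.strip()])
--     comment = len([line for line in lines if line.strip().startswith("#")])
--     code_lines = total - blank - comment
--
--     return {
--         "total": total,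
--         "code": code_lines,
--         "blank": blank,
--         "comment": comment,
--     }
-- ===== SOURCE B (Python) =====
-- def get_line_count(code: str):
--     """Count total/code/blank/comment lines in one pass."""
--     lines = code.split("\n")
--     blank = comment = code_lines = 0
--     for line in lines:
--         s = line.strip()
--         if not s:
--             blank += 1
--         elif s.startswith("#"):
--             comment += 1
--         else:
--             code_lines += 1
--     return {
--         "total": len(lines),
--         "code": code_lines,
--         "blank": blank,
--         "comment": comment,
--     }
-- ===== Notes on version B (the rewrite author's own statement) =====
-- stated objective: simpler
-- what changed: Replaced A's three separate comprehension scans and the code-by-subtraction with a single classification loop over the lines maintaining blank/comment/code counters.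
import Mathlib
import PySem

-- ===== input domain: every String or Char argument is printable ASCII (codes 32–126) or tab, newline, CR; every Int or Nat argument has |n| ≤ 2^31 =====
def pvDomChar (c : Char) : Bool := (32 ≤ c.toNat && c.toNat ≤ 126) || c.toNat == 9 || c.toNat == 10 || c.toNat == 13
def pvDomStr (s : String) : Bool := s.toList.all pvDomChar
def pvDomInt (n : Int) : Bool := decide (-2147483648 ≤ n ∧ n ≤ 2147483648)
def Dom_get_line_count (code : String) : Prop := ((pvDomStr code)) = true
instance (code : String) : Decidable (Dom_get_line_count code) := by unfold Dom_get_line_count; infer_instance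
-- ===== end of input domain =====

-- B replaces A's three comprehension passes over the lines with one classification loop
-- keeping blank/comment/code counters (objective: simpler single pass, same result).


-- ===== PORT A =====
-- code.split("\n") with the nonempty literal separator: PySem.Chars.splitOn (exact)
def get_line_count (code : String) : List (String × Int) :=
  let lines : List String := (PySem.Chars.splitOn code.toList "\n".toList).map String.ofList
  let total : Int := lines.length
  let blank : Int := (lines.filter (fun line => PySem.Str.strip line == "")).length
  let comment : Int := (lines.filter (fun line => PySem.Str.startswith (PySem.Str.strip line) "#")).length
  let code_lines : Int := total - blank - comment
  [("total", total), ("code", code_lines), ("blank", blank), ("comment", comment)]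

-- ===== PORT B =====
def get_line_count_alt (code : String) : List (String × Int) :=
  let lines : List String := (PySem.Chars.splitOn code.toList "\n".toList).map String.ofList
  let acc := lines.foldl (fun (acc : Int × Int × Int) line =>
      let s := PySem.Str.strip line
      if s == "" then (acc.1 + 1, acc.2.1, acc.2.2)
      else if PySem.Str.startswith s "#" then (acc.1, acc.2.1 + 1, acc.2.2)
      else (acc.1, acc.2.1, acc.2.2 + 1)) ((0 : Int), (0 : Int), (0 : Int))
  [("total", (lines.length : Int)), ("code", acc.2.2), ("blank", acc.1), ("comment", acc.2.1)]

-- ===== PRECONDITION & SPEC =====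
def Spec_get_line_count (code : String) (out : List (String × Int)) : Prop := out = get_line_count_alt code
instance (code : String) (out : List (String × Int)) : Decidable (Spec_get_line_count code out) := by unfold Spec_get_line_count; infer_instance

-- ===== CLAIM (what is proved, stated in full; the proofs are below) =====
def Claim_equal_get_line_count : Prop := ∀ (code : String), Dom_get_line_count code → Spec_get_line_count code (get_line_count code)

-- ===== LEMMAS AND PROOFS =====

-- a stripped line starting with '#' is nonempty
theorem strip_hash_ne_empty (l : String) (h : PySem.Str.startswith (PySem.Str.strip l) "#" = true) :
    (PySem.Str.strip l == "") = false := by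
  simp only [PySem.Str.startswith_eq] at h
  rw [PySem.Chars.startswith_iff] at h
  rcases h with ⟨t, ht⟩
  simp only [beq_eq_false_iff_ne, ne_eq]
  intro he
  rw [he] at ht
  simp at ht

theorem fold_counts (lines : List String) (b c k : Int) :
    lines.foldl (fun (acc : Int × Int × Int) line =>
      let s := PySem.Str.strip line
      if s == "" then (acc.1 + 1, acc.2.1, acc.2.2)
      else if PySem.Str.startswith s "#" then (acc.1, acc.2.1 + 1, acc.2.2)
      else (acc.1, acc.2.1, acc.2.2 + 1)) (b, c, k)
    = (b + (lines.countP (fun l => PySem.Str.strip l == "") : Int),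
       c + (lines.countP (fun l => PySem.Str.startswith (PySem.Str.strip l) "#") : Int),
       k + (lines.length : Int)
         - (lines.countP (fun l => PySem.Str.strip l == "") : Int)
         - (lines.countP (fun l => PySem.Str.startswith (PySem.Str.strip l) "#") : Int)) := by
  induction lines generalizing b c k with
  | nil => simp
  | cons l rest ih =>
    simp only [List.foldl_cons, List.countP_cons, List.length_cons]
    by_cases hb : (PySem.Str.strip l == "") = true
    · have hc : PySem.Str.startswith (PySem.Str.strip l) "#" = false := by
        by_contra h
        rw [Bool.not_eq_false] at h
        rw [strip_hash_ne_empty l h] at hb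
        exact absurd hb (by simp)
      simp only [hb, hc, if_true, ih, Prod.mk.injEq]
      push_cast
      refine ⟨by ring, by ring, by ring⟩
    · rw [Bool.not_eq_true] at hb
      by_cases hc : PySem.Str.startswith (PySem.Str.strip l) "#" = true
      · simp only [hb, hc, ih, Prod.mk.injEq]
        push_cast
        refine ⟨by ring, by ring, by ring⟩
      · rw [Bool.not_eq_true] at hc
        simp only [hb, hc, ih, Prod.mk.injEq]
        push_cast
        refine ⟨by ring, by ring, by ring⟩

-- ===== VERDICT (by name: the statement is the Claim_ definition above) =====
theorem get_line_count_spec : Claim_equal_get_line_count := by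
  intro code _
  unfold Spec_get_line_count get_line_count get_line_count_alt
  simp only [fold_counts, List.countP_eq_length_filter, List.cons.injEq, Prod.mk.injEq]
  push_cast
  and_intros <;> first | trivial | ring
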